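-- pv_equiv track=rewrite | github.com/hyunjooooojung/Algorithm_Test | 프로그래머스/2/42584. 주식가격/주식가격.py | solution
-- ===== SOURCE A (Python) =====
-- from collections import deque
--
-- def solution(prices):
--     answer = []
--     prices = deque(prices)
--
--     while prices:
--         time = 0
--         now = prices.popleft()
--         for p in prices:
--             time += 1
--             if p < now:
--                 break
--         answer.append(time)
--
--     return answer
-- ===== SOURCE B (Python) =====
-- def solution(prices):
--     # O(n) monotonic stack, scanning right-to-left: stack holds (index, price)
--     # of nearest-smaller candidates to the right.
--     n = len(prices)
--     answer = []
--     stack = []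
--     for i, p in reversed(list(enumerate(prices))):
--         while stack and stack[-1][1] >= p:
--             stack.pop()
--         answer.append(stack[-1][0] - i if stack else n - 1 - i)
--         stack.append((i, p))
--     answer.reverse()
--     return answer
-- ===== Notes on version B (the rewrite author's own statement) =====
-- stated objective: faster
-- what changed: Replaced the per-element forward scan over the remaining deque with a single right-to-left pass maintaining a monotonic stack of nearest-smaller candidates.
import Mathlib
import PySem

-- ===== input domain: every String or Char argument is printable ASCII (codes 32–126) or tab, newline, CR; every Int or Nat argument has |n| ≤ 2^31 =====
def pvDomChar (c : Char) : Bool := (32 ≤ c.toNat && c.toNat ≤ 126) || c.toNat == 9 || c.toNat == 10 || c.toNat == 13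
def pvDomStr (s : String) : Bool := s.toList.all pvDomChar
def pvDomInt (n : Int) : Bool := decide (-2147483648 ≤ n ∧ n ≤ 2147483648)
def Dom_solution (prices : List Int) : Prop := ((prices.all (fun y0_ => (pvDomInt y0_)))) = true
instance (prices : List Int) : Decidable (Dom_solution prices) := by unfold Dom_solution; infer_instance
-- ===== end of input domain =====

-- B replaces A's O(n^2) per-element forward scan with one O(n) right-to-left pass
-- keeping a monotonic stack of nearest-smaller candidates (objective: faster).

-- ===== PORT A =====
-- inner 'for p in prices: time += 1; if p < now: break'
def countTime (now : Int) : List Int → Int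
  | [] => 0
  | p :: ps => if p < now then 1 else 1 + countTime now ps

-- outer 'while prices: now = prices.popleft(); answer.append(time)'
def solution : (prices : List Int) → List Int
  | [] => []
  | x :: xs => countTime x xs :: solution xs

-- ===== PORT B =====
-- 'while stack and stack[-1][1] >= p: stack.pop()'
def popGE (p : Int) : List (Int × Int) → List (Int × Int)
  | [] => []
  | (j, q) :: rest => if q ≥ p then popGE p rest else (j, q) :: rest

-- one iteration of the reversed loop body (answer consed to the front, which
-- realises Python's append-then-reverse)
def stepB (n : Int) (ip : Int × Int) (acc : List Int × List (Int × Int)) :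
    List Int × List (Int × Int) :=
  let st := popGE ip.2 acc.2
  let a : Int := match st with
    | (j, _) :: _ => j - ip.1
    | [] => n - 1 - ip.1
  (a :: acc.1, (ip.1, ip.2) :: st)

def solution_alt (prices : List Int) : List Int :=
  let n : Int := prices.length
  (List.foldr (stepB n) ([], []) (PySem.List.enumerate prices)).1

-- ===== PRECONDITION & SPEC =====
def Spec_solution (prices : List Int) (out : List Int) : Prop := out = solution_alt prices
instance (prices : List Int) (out : List Int) : Decidable (Spec_solution prices out) := by unfold Spec_solution; infer_instance

-- ===== CLAIM (what is proved, stated in full; the proofs are below) =====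
def Claim_equal_solution : Prop := ∀ (prices : List Int), Dom_solution prices → Spec_solution prices (solution prices)

-- ===== LEMMAS AND PROOFS =====

-- reading an answer off the stack, as an absolute index (n-1 when stack empties)
def gOf (n : Int) (st : List (Int × Int)) (p : Int) : Int :=
  match popGE p st with
  | (j, _) :: _ => j
  | [] => n - 1

theorem popGE_popGE (p q : Int) (h : p ≤ q) (st : List (Int × Int)) :
    popGE p (popGE q st) = popGE p st := by
  induction st with
  | nil => rfl
  | cons hd tl ih =>
    obtain ⟨j, r⟩ := hd
    by_cases hq : r ≥ q
    · simp [popGE, hq, ih, le_trans h hq]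
    · simp [popGE, hq]

theorem foldr_key (n : Int) (xs : List Int) : ∀ (s : Int), s + xs.length = n →
    (List.foldr (stepB n) ([], []) (PySem.List.enumerate xs s)).1 = solution xs ∧
    (∀ p, gOf n (List.foldr (stepB n) ([], []) (PySem.List.enumerate xs s)).2 p
          = s - 1 + countTime p xs) := by
  induction xs with
  | nil =>
    intro s hs
    refine ⟨rfl, fun p => ?_⟩
    simp at hs
    simp [PySem.List.enumerate, gOf, popGE, countTime, hs]
  | cons q rest ih =>
    intro s hs
    have hs' : (s + 1) + rest.length = n := by
      simp at hs; omega
    obtain ⟨ih1, ih2⟩ := ih (s + 1) hs'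
    rw [PySem.List.enumerate_cons]
    set r := List.foldr (stepB n) ([], []) (PySem.List.enumerate rest (s + 1)) with hr
    constructor
    · show (stepB n (s, q) r).1 = solution (q :: rest)
      have ha : (match popGE q r.2 with
          | (j, _) :: _ => j - s
          | [] => n - 1 - s) = countTime q rest := by
        have := ih2 q
        unfold gOf at this
        rcases hpg : popGE q r.2 with _ | ⟨⟨j, v⟩, tl⟩ <;> rw [hpg] at this <;> dsimp only at this ⊢
        · linarith
        · linarith
      simp [stepB, solution, ha, ih1]
    · intro p
      show gOf n (stepB n (s, q) r).2 p = s - 1 + countTime p (q :: rest)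
      by_cases hlt : q < p
      · have : ¬ (q ≥ p) := by omega
        simp [stepB, gOf, popGE, this, countTime, hlt]
      · have hge : q ≥ p := by omega
        have hpp := popGE_popGE p q hge r.2
        have := ih2 p
        unfold gOf at this ⊢
        simp only [stepB]
        rw [show popGE p ((s, q) :: popGE q r.2) = popGE p (popGE q r.2) by
              simp [popGE, hge], hpp]
        simp [countTime, hlt]
        omega

-- ===== VERDICT (by name: the statement is the Claim_ definition above) =====
theorem solution_spec : Claim_equal_solution := by
  intro prices _
  show solution prices = solution_alt prices
  unfold solution_alt
  exact ((foldr_key (prices.length : Int) prices 0 (by simp)).1).symm
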